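-- pv_equiv track=rewrite | github.com/Mambatukaa/problems | leetCodeDaily/2025/april/23.countLargestGroup.1399.py | countLargestGroupII
-- ===== SOURCE A (Python) =====
-- from collections import defaultdict
--
-- def countLargestGroupII(n: int) -> int:
--     def calc_digit_sum(num):
--         res = 0
--
--         while num > 0:
--             res += num % 10
--             num //= 10
--
--         return res
--
--
--     counter = defaultdict(int)
--
--     largest_size = 0
--
--     for num in range(1, n + 1):
--         # calculate the digit sum and increase the count
--         digitSum = calc_digit_sum(num)
--
--         # update the answer
--         counter[digitSum] += 1
--
--         largest_size = max(counter[digitSum], largest_size)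
--
--     res = 0
--
--     for value in counter.values():
--         if value == largest_size:
--             res += 1
--
--     return res
-- ===== SOURCE B (Python) =====
-- def countLargestGroupII(n: int) -> int:
--     if n <= 0:
--         return 0
--     # dynamic programming: digit_sum(i) = digit_sum(i // 10) + i % 10
--     ds = [0] * (n + 1)
--     for i in range(1, n + 1):
--         ds[i] = ds[i // 10] + i % 10
--     counts = {}
--     for s in ds[1:]:
--         counts[s] = counts.get(s, 0) + 1
--     best = max(counts.values())
--     return sum(1 for v in counts.values() if v == best)
-- ===== Notes on version B (the rewrite author's own statement) =====
-- stated objective: faster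
-- what changed: B replaces A's per-number inner digit-extraction loop (repeated divisions per number) by a dynamic-programming table in which each entry is its own last digit plus the already-computed digit sum of the number without that digit, filled in one pass, and takes the maximum of the group counts once at the end instead of maintaining it online.
import Mathlib
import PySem

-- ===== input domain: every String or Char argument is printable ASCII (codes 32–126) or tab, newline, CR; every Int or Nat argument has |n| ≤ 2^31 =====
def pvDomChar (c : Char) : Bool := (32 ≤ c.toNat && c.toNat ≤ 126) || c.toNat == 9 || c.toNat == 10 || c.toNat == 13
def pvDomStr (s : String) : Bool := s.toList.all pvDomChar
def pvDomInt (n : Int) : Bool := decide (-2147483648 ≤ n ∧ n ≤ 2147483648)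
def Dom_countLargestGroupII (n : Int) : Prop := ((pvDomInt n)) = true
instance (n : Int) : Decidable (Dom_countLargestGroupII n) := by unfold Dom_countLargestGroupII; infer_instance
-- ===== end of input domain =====

-- B replaces A's per-number digit-extraction inner loop by a DP table (each entry = last digit plus
-- the table entry of the number without that digit) and takes the maximum of the counts once at the
-- end instead of maintaining it online (objective: faster, measured).

-- ===== PORT A =====
-- while num > 0: res += num % 10; num //= 10
def calcDigitSumA (num : Int) (res : Int) : Int :=
  if 0 < num then
    calcDigitSumA (PySem.Int.floordiv num 10) (res + PySem.Int.mod num 10)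
  else
    res
termination_by num.toNat
decreasing_by
  have := PySem.Int.floordiv_eq_ediv_of_pos (a := num) (b := 10) (by omega)
  rw [this]; omega

def countLargestGroupII (n : Int) : Int :=
  let st := (PySem.List.pyRange 1 (n + 1) 1).foldl
    (fun (s : PySem.Dict Int Int × Int) num =>
      let digitSum := calcDigitSumA num 0
      let counter := s.1.insert digitSum (s.1.getD digitSum 0 + 1)
      (counter, max (counter.getD digitSum 0) s.2))
    (PySem.Dict.empty, 0)
  st.1.values.foldl (fun res v => if v == st.2 then res + 1 else res) 0

-- ===== PORT B =====
def countLargestGroupII_alt (n : Int) : Int :=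
  if n ≤ 0 then 0
  else
    let ds0 : List Int := List.replicate (n + 1).toNat 0
    let ds := (PySem.List.pyRange 1 (n + 1) 1).foldl
      (fun a i =>
        PySem.List.pySetD a i
          (PySem.List.pyGetD a (PySem.Int.floordiv i 10) 0 + PySem.Int.mod i 10))
      ds0
    let counts := (PySem.List.slice ds (some 1) none).foldl
      (fun (d : PySem.Dict Int Int) s => d.insert s (d.getD s 0 + 1)) PySem.Dict.empty
    let best := (PySem.List.max? counts.values (fun v => v)).getD 0
    ((counts.values.filter (fun v => v == best)).length : Int)

-- ===== PRECONDITION & SPEC =====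
def Spec_countLargestGroupII (n : Int) (out : Int) : Prop := out = countLargestGroupII_alt n
instance (n : Int) (out : Int) : Decidable (Spec_countLargestGroupII n out) := by unfold Spec_countLargestGroupII; infer_instance

-- ===== CLAIM (what is proved, stated in full; the proofs are below) =====
def Claim_equal_countLargestGroupII : Prop := ∀ (n : Int), Dom_countLargestGroupII n → Spec_countLargestGroupII n (countLargestGroupII n)

-- ===== LEMMAS AND PROOFS =====

-- digit-sum helper facts -----------------------------------------------------

def pvCalc (i : Int) : Int := calcDigitSumA i 0

lemma pvCalc_acc (num res : Int) : calcDigitSumA num res = res + pvCalc num := by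
  generalize hk : num.toNat = k
  induction k using Nat.strong_induction_on generalizing num res with
  | _ k ih =>
    rw [calcDigitSumA]
    conv_rhs => rw [pvCalc, calcDigitSumA]
    split_ifs with h
    · have hd : PySem.Int.floordiv num 10 = num / 10 :=
        PySem.Int.floordiv_eq_ediv_of_pos (by omega)
      rw [ih (PySem.Int.floordiv num 10).toNat (by rw [hd]; omega) _ _ rfl,
        ih (PySem.Int.floordiv num 10).toNat (by rw [hd]; omega) _ _ rfl]
      ring
    · ring

lemma pvCalc_pos (i : Int) (h : 0 < i) :
    pvCalc i = pvCalc (PySem.Int.floordiv i 10) + PySem.Int.mod i 10 := by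
  rw [pvCalc, calcDigitSumA, if_pos h, pvCalc_acc]
  rw [pvCalc]
  ring

lemma pvCalc_nonpos (i : Int) (h : ¬ 0 < i) : pvCalc i = 0 := by
  rw [pvCalc, calcDigitSumA, if_neg h]

-- running max ----------------------------------------------------------------

def pvFmax (l : List Int) : Int := l.foldl max 0

lemma pvFmax_nonneg (l : List Int) : 0 ≤ pvFmax l := (PySem.List.le_foldl_max l 0).1

lemma pvFmax_shift (l : List Int) (a : Int) (ha : 0 ≤ a) :
    l.foldl max a = max a (pvFmax l) := by
  induction l generalizing a with
  | nil => simp [pvFmax]; omega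
  | cons x t ih =>
    have h1 : (x :: t).foldl max a = t.foldl max (max a x) := rfl
    have h2 : pvFmax (x :: t) = t.foldl max (max 0 x) := rfl
    rw [h1, h2, ih (max a x) (by omega), ih (max 0 x) (by omega)]
    have := pvFmax_nonneg t
    omega

lemma pvFmax_append (l1 l2 : List Int) :
    pvFmax (l1 ++ l2) = max (pvFmax l1) (pvFmax l2) := by
  show (l1 ++ l2).foldl max 0 = _
  rw [List.foldl_append, pvFmax_shift l2 (List.foldl max 0 l1) (pvFmax_nonneg l1)]
  rfl

lemma pvFmax_cons (x : Int) (l : List Int) :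
    pvFmax (x :: l) = max x (pvFmax l) := by
  have h2 : pvFmax (x :: l) = l.foldl max (max 0 x) := rfl
  rw [h2, pvFmax_shift l _ (by omega)]
  have := pvFmax_nonneg l
  omega

-- counter facts --------------------------------------------------------------

lemma values_counter (x : List Int) :
    (PySem.Dict.counter x).values
      = (PySem.Set.ofList x).map (fun j => (x.count j : Int)) := by
  have h : (PySem.Dict.counter x).values = (PySem.Dict.counter x).items.map (·.2) := rfl
  rw [h, PySem.Dict.items_counter, List.map_map]
  rfl

lemma mem_values_counter_pos (x : List Int) (w : Int)
    (hw : w ∈ (PySem.Dict.counter x).values) : 1 ≤ w := by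
  rw [values_counter] at hw
  obtain ⟨j, hj, rfl⟩ := List.mem_map.1 hw
  have hjx : j ∈ x := (PySem.Set.mem_ofList _ _).1 hj
  have := List.count_pos_iff.2 hjx
  omega

-- the max-of-counts step lemma ----------------------------------------------

lemma pvFmax_counter_append (m : List Int) (k : Int) :
    pvFmax ((PySem.Dict.counter (m ++ [k])).values)
      = max ((m.count k : Int) + 1) (pvFmax ((PySem.Dict.counter m).values)) := by
  rw [values_counter, values_counter, PySem.Set.ofList_append_singleton]
  have hcnt_ne : ∀ j : Int, j ≠ k → (m ++ [k]).count j = m.count j := by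
    intro j hjk
    rw [List.count_append]
    simp [Ne.symm hjk]
  have hcnt_k : (m ++ [k]).count k = m.count k + 1 := by
    rw [List.count_append]; simp
  by_cases hk : k ∈ m
  · have hkS : k ∈ PySem.Set.ofList m := (PySem.Set.mem_ofList _ _).2 hk
    rw [PySem.Set.add_of_mem hkS]
    obtain ⟨s1, s2, hS⟩ := List.append_of_mem hkS
    have hnd : (PySem.Set.ofList m).Nodup := PySem.Set.nodup_ofList m
    rw [hS] at hnd ⊢
    rw [List.nodup_append] at hnd
    have hk2 : k ∉ s2 := by
      have := hnd.2.1
      simp at this; exact this.1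
    have hk1 : k ∉ s1 := by
      intro h1; exact hnd.2.2 k h1 k (by exact List.mem_cons_self) rfl
    have hmap : ∀ (s : List Int), k ∉ s →
        s.map (fun j => ((m ++ [k]).count j : Int)) = s.map (fun j => (m.count j : Int)) := by
      intro s hks
      apply List.map_congr_left
      intro j hjs
      have hjk : j ≠ k := fun h => hks (h ▸ hjs)
      rw [hcnt_ne j hjk]
    rw [List.map_append, List.map_cons, List.map_append, List.map_cons,
      hmap s1 hk1, hmap s2 hk2]
    have hfk : ((m ++ [k]).count k : Int) = (m.count k : Int) + 1 := by
      rw [hcnt_k]; push_cast; ring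
    rw [hfk]
    rw [pvFmax_append, pvFmax_cons, pvFmax_append, pvFmax_cons]
    have h1 := pvFmax_nonneg (s1.map (fun j => (m.count j : Int)))
    have h2 := pvFmax_nonneg (s2.map (fun j => (m.count j : Int)))
    have h3 : (0:Int) ≤ (m.count k : Int) := by positivity
    omega
  · have hkS : k ∉ PySem.Set.ofList m := fun h => hk ((PySem.Set.mem_ofList _ _).1 h)
    rw [PySem.Set.add_of_not_mem hkS]
    have hmap : (PySem.Set.ofList m).map (fun j => ((m ++ [k]).count j : Int))
        = (PySem.Set.ofList m).map (fun j => (m.count j : Int)) := by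
      apply List.map_congr_left
      intro j hjs
      have hjk : j ≠ k := fun h => hkS (h ▸ hjs)
      rw [hcnt_ne j hjk]
    have hck : m.count k = 0 := List.count_eq_zero.2 hk
    rw [List.map_append, hmap, List.map_singleton]
    rw [pvFmax_append]
    have hfk : ((m ++ [k]).count k : Int) = 1 := by
      rw [hcnt_k, hck]; simp
    rw [hfk, hck]
    have h1 := pvFmax_nonneg ((PySem.Set.ofList m).map (fun j => (m.count j : Int)))
    have h2 : pvFmax [(1:Int)] = 1 := by decide
    rw [h2]
    omega
-- A-side characterization ----------------------------------------------------

def pvStepA (s : PySem.Dict Int Int × Int) (k : Int) : PySem.Dict Int Int × Int :=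
  let c := s.1.insert k (s.1.getD k 0 + 1)
  (c, max (c.getD k 0) s.2)

lemma count_append_self (m : List Int) (k : Int) :
    (m ++ [k]).count k = m.count k + 1 := by
  rw [List.count_append]; simp

lemma counter_insert_step (m : List Int) (k : Int) :
    (PySem.Dict.counter m).insert k ((PySem.Dict.counter m).getD k 0 + 1)
      = PySem.Dict.counter (m ++ [k]) := by
  have h1 := PySem.Dict.foldl_insert_getD_add_one_eq_counter (xs := m ++ [k])
  have h2 := PySem.Dict.foldl_insert_getD_add_one_eq_counter (xs := m)
  rw [List.foldl_append] at h1
  rw [h2] at h1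
  simpa using h1

lemma foldl_stepA (m : List Int) :
    m.foldl pvStepA (PySem.Dict.empty, 0)
      = (PySem.Dict.counter m, pvFmax (PySem.Dict.counter m).values) := by
  induction m using List.reverseRecOn with
  | nil => rfl
  | append_singleton m k ih =>
    rw [List.foldl_append, ih]
    have hstep : pvStepA (PySem.Dict.counter m, pvFmax (PySem.Dict.counter m).values) k
        = (PySem.Dict.counter (m ++ [k]),
            max ((PySem.Dict.counter (m ++ [k])).getD k 0)
              (pvFmax (PySem.Dict.counter m).values)) := by
      unfold pvStepA
      rw [counter_insert_step]
    rw [show ([k].foldl pvStepA (PySem.Dict.counter m, pvFmax (PySem.Dict.counter m).values))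
        = pvStepA (PySem.Dict.counter m, pvFmax (PySem.Dict.counter m).values) k from rfl,
      hstep]
    have hg : (PySem.Dict.counter (m ++ [k])).getD k 0 = ((m ++ [k]).count k : Int) :=
      PySem.Dict.getD_counter _ _
    rw [hg, pvFmax_counter_append, count_append_self]
    push_cast
    ring_nf

def pvM (n : Int) : List Int := (PySem.List.pyRange 1 (n + 1) 1).map pvCalc

lemma A_eq (n : Int) : countLargestGroupII n
    = (((PySem.Dict.counter (pvM n)).values.count
        (pvFmax (PySem.Dict.counter (pvM n)).values) : Nat) : Int) := by
  have hbody : (fun (s : PySem.Dict Int Int × Int) num =>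
      let digitSum := calcDigitSumA num 0
      let counter := s.1.insert digitSum (s.1.getD digitSum 0 + 1)
      (counter, max (counter.getD digitSum 0) s.2)) = fun s num => pvStepA s (pvCalc num) := rfl
  show ((PySem.List.pyRange 1 (n + 1) 1).foldl
      (fun (s : PySem.Dict Int Int × Int) num =>
        let digitSum := calcDigitSumA num 0
        let counter := s.1.insert digitSum (s.1.getD digitSum 0 + 1)
        (counter, max (counter.getD digitSum 0) s.2))
      (PySem.Dict.empty, 0)).1.values.foldl
        (fun res v => if v == ((PySem.List.pyRange 1 (n + 1) 1).foldl _ (PySem.Dict.empty, 0)).2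
          then res + 1 else res) 0 = _
  rw [hbody, ← List.foldl_map (f := pvCalc) (g := pvStepA)]
  rw [show (PySem.List.pyRange 1 (n + 1) 1).map pvCalc = pvM n from rfl, foldl_stepA]
  rw [PySem.List.foldl_beq_add_one]
  simp
-- B-side: the DP table -------------------------------------------------------

def pvTab (n b : Int) : List Int :=
  (List.range (n + 1).toNat).map
    (fun (j : Nat) => if 1 ≤ j ∧ (j : Int) < b then pvCalc (j : Int) else 0)

lemma tab_init (n : Int) : List.replicate (n + 1).toNat (0 : Int) = pvTab n 1 := by
  unfold pvTab
  rw [show (fun (j : Nat) => if 1 ≤ j ∧ (j : Int) < 1 then pvCalc (j : Int) else 0)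
      = fun _ : Nat => (0 : Int) from by funext j; rw [if_neg (by omega)]]
  simp [List.map_const']

lemma tab_getElem (n b : Int) (j : Nat) {hj : j < ((List.range (n + 1).toNat).map
      (fun (j : Nat) => if 1 ≤ j ∧ (j : Int) < b then pvCalc (j : Int) else 0)).length} :
    (pvTab n b)[j]'(by exact hj)
      = if 1 ≤ j ∧ (j : Int) < b then pvCalc (j : Int) else 0 := by
  unfold pvTab
  rw [List.getElem_map, List.getElem_range]

lemma tab_length (n b : Int) : (pvTab n b).length = (n + 1).toNat := by
  unfold pvTab; simp

lemma tab_step (n b : Int) (hb : 1 ≤ b) (hbn : b ≤ n) :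
    PySem.List.pySetD (pvTab n b) b
      (PySem.List.pyGetD (pvTab n b) (PySem.Int.floordiv b 10) 0 + PySem.Int.mod b 10)
      = pvTab n (b + 1) := by
  have hdiv : PySem.Int.floordiv b 10 = b / 10 := PySem.Int.floordiv_eq_ediv_of_pos (by omega)
  have hlen := tab_length n b
  have hget : PySem.List.pyGetD (pvTab n b) (PySem.Int.floordiv b 10) 0
      = pvCalc (PySem.Int.floordiv b 10) := by
    rw [hdiv]
    have h0 : (0:Int) ≤ b / 10 := by omega
    have hlt : b / 10 < b := by omega
    rw [PySem.List.pyGetD_eq_getElem _ _ h0 (by rw [hlen]; omega)]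
    rw [tab_getElem]
    by_cases hc : 1 ≤ (b / 10).toNat
    · rw [if_pos ⟨hc, by omega⟩]
      congr 1
      omega
    · rw [if_neg (by omega)]
      rw [pvCalc_nonpos _ (by omega)]
  rw [hget, PySem.List.pySetD_of_nonneg _ _ (by omega)]
  have hvb : pvCalc (PySem.Int.floordiv b 10) + PySem.Int.mod b 10 = pvCalc b :=
    (pvCalc_pos b (by omega)).symm
  rw [hvb]
  apply List.ext_getElem
  · rw [List.length_set, hlen, tab_length]
  · intro j hj1 hj2
    rw [List.getElem_set, tab_getElem n (b + 1) j]
    rw [List.length_set, hlen] at hj1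
    by_cases hjb : b.toNat = j
    · rw [if_pos hjb]
      rw [if_pos (by omega)]
      congr 1
      omega
    · rw [if_neg hjb, tab_getElem]
      by_cases hc : 1 ≤ j ∧ (j : Int) < b
      · rw [if_pos hc, if_pos ⟨hc.1, by omega⟩]
      · rw [if_neg hc, if_neg (by omega)]

lemma tab_fold (n : Int) (b : Int) (hb : 1 ≤ b) (hbn : b ≤ n + 1) :
    (PySem.List.pyRange 1 b 1).foldl
      (fun a i =>
        PySem.List.pySetD a i
          (PySem.List.pyGetD a (PySem.Int.floordiv i 10) 0 + PySem.Int.mod i 10))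
      (pvTab n 1) = pvTab n b := by
  induction b, hb using Int.le_induction with
  | base =>
    rw [PySem.List.pyRange_one_eq_nil (by omega)]
    rfl
  | succ b hb ih =>
    rw [PySem.List.pyRange_one_succ_right (by omega), List.foldl_append,
      ih (by omega)]
    exact tab_step n b hb (by omega)

lemma tab_drop (n : Int) (hn : 1 ≤ n) : (pvTab n (n + 1)).drop 1 = pvM n := by
  apply List.ext_getElem
  · rw [List.length_drop, tab_length]
    unfold pvM
    rw [List.length_map, PySem.List.length_pyRange_one]
    omega
  · intro j hj1 hj2
    rw [List.getElem_drop, tab_getElem]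
    unfold pvM
    rw [List.getElem_map, PySem.List.getElem_pyRange_one]
    rw [List.length_drop, tab_length] at hj1
    rw [if_pos (by constructor <;> omega)]
    congr 1
-- B overall ------------------------------------------------------------------

lemma pvM_ne_nil (n : Int) (hn : 1 ≤ n) : pvM n ≠ [] := by
  apply List.ne_nil_of_length_pos
  unfold pvM
  rw [List.length_map, PySem.List.length_pyRange_one]
  omega

lemma counter_values_ne_nil (x : List Int) (hx : x ≠ []) :
    (PySem.Dict.counter x).values ≠ [] := by
  rw [values_counter]
  intro h
  apply hx
  have hS := List.map_eq_nil_iff.1 h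
  cases x with
  | nil => rfl
  | cons a t =>
    rw [PySem.Set.ofList_cons] at hS
    exact absurd hS (by simp)

lemma B_eq (n : Int) (hn : 1 ≤ n) :
    countLargestGroupII_alt n
      = (((PySem.Dict.counter (pvM n)).values.count
          (pvFmax ((PySem.Dict.counter (pvM n)).values)) : Nat) : Int) := by
  unfold countLargestGroupII_alt
  rw [if_neg (by omega)]
  simp only [tab_init n, tab_fold n (n + 1) (by omega) (le_refl _),
    PySem.List.slice_from _ (by omega : (0:Int) ≤ 1)]
  rw [show (1 : Int).toNat = 1 from rfl, tab_drop n hn,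
    PySem.Dict.foldl_insert_getD_add_one_eq_counter]
  obtain ⟨v, t, hvs⟩ :=
    List.exists_cons_of_ne_nil (counter_values_ne_nil (pvM n) (pvM_ne_nil n hn))
  rw [hvs, PySem.List.max?_id_cons]
  simp only [Option.getD_some]
  have hv1 : (1:Int) ≤ v :=
    mem_values_counter_pos (pvM n) v (by rw [hvs]; exact List.mem_cons_self)
  have hbest : t.foldl max v = pvFmax (v :: t) := by
    rw [pvFmax_cons, pvFmax_shift t v (by omega)]
  rw [hbest]
  rw [List.count, List.countP_eq_length_filter]

-- everything together --------------------------------------------------------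

lemma AB_eq (n : Int) : countLargestGroupII n = countLargestGroupII_alt n := by
  by_cases hn : n ≤ 0
  · rw [A_eq]
    have hm : pvM n = [] := by
      unfold pvM
      rw [PySem.List.pyRange_one_eq_nil (by omega)]
      rfl
    rw [hm]
    unfold countLargestGroupII_alt
    rw [if_pos hn]
    decide
  · rw [A_eq, B_eq n (by omega)]

-- ===== VERDICT (by name: the statement is the Claim_ definition above) =====
theorem countLargestGroupII_spec : Claim_equal_countLargestGroupII := by
  intro n _
  unfold Spec_countLargestGroupII
  exact AB_eq n
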